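-- pv_equiv track=rewrite | github.com/sebastiencorreard/pax | backend/core/oef/evaluator.py | _pari_core
-- ===== SOURCE A (Python) =====
-- def _pari_core(n: int) -> int:
--     d = 2
--     res = n
--     while d * d <= res:
--         if res % (d * d) == 0:
--             res //= d * d
--         else:
--             d += 1
--     return res
-- ===== SOURCE B (Python) =====
-- def _pari_core(n: int) -> int:
--     result = 1
--     res = n
--     d = 2
--     while d * d <= res:
--         if res % d == 0:
--             e = 0
--             while res % d == 0:
--                 res //= d
--                 e += 1
--             if e % 2 == 1:
--                 result *= d
--         else:
--             d += 1
--     return result * res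
-- ===== Notes on version B (the rewrite author's own statement) =====
-- stated objective: alternative
-- what changed: Instead of repeatedly dividing n by d*d in place, B does a full trial-division factorization maintaining a product accumulator: each prime is divided out completely with its exponent counted, and multiplied into the result iff the exponent is odd, with the leftover factor multiplied in at the end.
import Mathlib
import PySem

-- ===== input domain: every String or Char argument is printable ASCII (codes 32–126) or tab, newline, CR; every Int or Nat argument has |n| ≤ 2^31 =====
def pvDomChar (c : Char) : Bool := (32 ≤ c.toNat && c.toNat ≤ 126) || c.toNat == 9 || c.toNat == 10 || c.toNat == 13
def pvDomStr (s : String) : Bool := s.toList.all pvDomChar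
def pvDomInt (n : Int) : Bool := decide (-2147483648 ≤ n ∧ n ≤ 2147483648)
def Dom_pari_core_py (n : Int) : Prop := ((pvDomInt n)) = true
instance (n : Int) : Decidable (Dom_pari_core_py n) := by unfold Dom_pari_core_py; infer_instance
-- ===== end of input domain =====

-- B replaces A's repeated division of n by d*d with a full trial-division factorization
-- keeping a product accumulator (multiply d in iff its exponent is odd); alternative decomposition, same cost.


-- ===== PORT A =====
-- termination facts for pariA_loop, named so the recursion can cite them
theorem pariA_dec1 (k : Nat) (res : Int) (h : ((k:Int)+2) * ((k:Int)+2) ≤ res) :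
    (PySem.Int.floordiv res (((k:Int)+2) * ((k:Int)+2))).toNat < res.toNat := by
  have hd : (0:Int) < ((k:Int)+2) * ((k:Int)+2) := by positivity
  have hres : (0:Int) < res := by nlinarith
  rw [PySem.Int.floordiv_eq_ediv_of_pos hd]
  have h1 : res / (((k:Int)+2) * ((k:Int)+2)) < res := by
    apply Int.ediv_lt_of_lt_mul hd; nlinarith
  have h2 : 0 ≤ res / (((k:Int)+2) * ((k:Int)+2)) := Int.ediv_nonneg (le_of_lt hres) (le_of_lt hd)
  omega

theorem pariA_dec2 (k : Nat) (res : Int) (h : ((k:Int)+2) * ((k:Int)+2) ≤ res) :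
    res.toNat - (k + 1) < res.toNat - k := by
  have h1 : ((k:Int)+2) ≤ ((k:Int)+2) * ((k:Int)+2) := by nlinarith
  have h2 : ((k:Int)+2) ≤ res := by omega
  omega

-- A's while loop over (d, res); d is carried as k with d = k + 2 (d starts at 2 and only grows).
def pariA_loop (k : Nat) (res : Int) : Int :=
  if ((k:Int)+2) * ((k:Int)+2) ≤ res then
    if PySem.Int.mod res (((k:Int)+2) * ((k:Int)+2)) = 0 then
      pariA_loop k (PySem.Int.floordiv res (((k:Int)+2) * ((k:Int)+2)))
    else pariA_loop (k + 1) res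
  else res
termination_by (res.toNat, res.toNat - k)
decreasing_by
  · exact Prod.Lex.left _ _ (pariA_dec1 k res (by assumption))
  · exact Prod.Lex.right _ (pariA_dec2 k res (by assumption))

def pari_core_py (n : Int) : Int := pariA_loop 0 n

-- ===== PORT B =====
-- B's inner while loop: divide d out of res completely, counting the exponent.
-- The `2 ≤ d ∧ 0 < res` conjuncts only make the recursion total; on every reachable call they hold.
theorem pariBdiv_dec (d res : Int) (h : 2 ≤ d ∧ 0 < res ∧ PySem.Int.mod res d = 0) :
    (PySem.Int.floordiv res d).toNat < res.toNat := by
  obtain ⟨hd, hres, -⟩ := h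
  rw [PySem.Int.floordiv_eq_ediv_of_pos (by omega)]
  have h1 : res / d < res := by apply Int.ediv_lt_of_lt_mul (by omega); nlinarith
  have h2 : 0 ≤ res / d := Int.ediv_nonneg (le_of_lt hres) (by omega)
  omega

def pariB_div (d res : Int) (e : Nat) : Int × Nat :=
  if h : 2 ≤ d ∧ 0 < res ∧ PySem.Int.mod res d = 0 then
    pariB_div d (PySem.Int.floordiv res d) (e + 1)
  else (res, e)
termination_by res.toNat
decreasing_by exact pariBdiv_dec d res h

-- facts needed for pariB_loop's termination (cited in decreasing_by)
theorem pariB_div_pos_le (d res : Int) (e : Nat) (hres : 0 < res) :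
    0 < (pariB_div d res e).1 ∧ (pariB_div d res e).1 ≤ res := by
  induction res, e using pariB_div.induct d with
  | case1 res e h ih =>
    obtain ⟨hd, hres0, hm⟩ := h
    rw [pariB_div, dif_pos ⟨hd, hres0, hm⟩]
    have hdvd : d ∣ res := (PySem.Int.mod_eq_zero_iff_dvd res d).mp hm
    have hfd : PySem.Int.floordiv res d = res / d := PySem.Int.floordiv_eq_ediv_of_pos (by omega)
    have hge : d ≤ res := Int.le_of_dvd hres0 hdvd
    have hpos : 0 < res / d := by
      have : (1:Int) ≤ res / d := Int.le_ediv_iff_mul_le (by omega) |>.mpr (by omega)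
      omega
    have hle : res / d ≤ res := Int.ediv_le_self d (le_of_lt hres0)
    rw [hfd]
    obtain ⟨ih1, ih2⟩ := ih (by rw [hfd]; exact hpos)
    rw [hfd] at ih1 ih2
    exact ⟨ih1, by omega⟩
  | case2 res e h =>
    rw [pariB_div, dif_neg h]
    exact ⟨hres, le_refl res⟩

theorem pariB_div_lt (d res : Int) (e : Nat) (hd : 2 ≤ d) (hres : 0 < res)
    (hm : PySem.Int.mod res d = 0) : (pariB_div d res e).1 < res := by
  rw [pariB_div, dif_pos ⟨hd, hres, hm⟩]
  have hdvd : d ∣ res := (PySem.Int.mod_eq_zero_iff_dvd res d).mp hm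
  have hfd : PySem.Int.floordiv res d = res / d := PySem.Int.floordiv_eq_ediv_of_pos (by omega)
  have hge : d ≤ res := Int.le_of_dvd hres hdvd
  have hpos : 0 < res / d := by
    have : (1:Int) ≤ res / d := Int.le_ediv_iff_mul_le (by omega) |>.mpr (by omega)
    omega
  have hlt : res / d < res := by apply Int.ediv_lt_of_lt_mul (by omega); nlinarith
  have := (pariB_div_pos_le d (PySem.Int.floordiv res d) (e+1) (hfd ▸ hpos)).2
  omega

-- termination fact for pariB_loop's divide-out step
theorem pariBloop_dec1 (k : Nat) (res res' : Int) (e : Nat)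
    (hle : ((k:Int)+2) * ((k:Int)+2) ≤ res) (hm : PySem.Int.mod res ((k:Int)+2) = 0)
    (hp : pariB_div ((k:Int)+2) res 0 = (res', e)) : res'.toNat < res.toNat := by
  have hres : (0:Int) < res := by nlinarith
  have h1 := pariB_div_lt ((k:Int)+2) res 0 (by omega) hres hm
  have h2 := (pariB_div_pos_le ((k:Int)+2) res 0 hres).1
  rw [hp] at h1 h2
  omega

-- B's outer while loop over (d, res, result); d carried as k with d = k + 2.
def pariB_loop (k : Nat) (res result : Int) : Int :=
  if ((k:Int)+2) * ((k:Int)+2) ≤ res then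
    if PySem.Int.mod res ((k:Int)+2) = 0 then
      match hp : pariB_div ((k:Int)+2) res 0 with
      | (res', e) => pariB_loop k res' (if e % 2 = 1 then result * ((k:Int)+2) else result)
    else pariB_loop (k + 1) res result
  else result * res
termination_by (res.toNat, res.toNat - k)
decreasing_by
  · exact Prod.Lex.left _ _ (pariBloop_dec1 k res res' e (by assumption) (by assumption) hp)
  · exact Prod.Lex.right _ (pariA_dec2 k res (by assumption))

def pari_core_py_alt (n : Int) : Int := pariB_loop 0 n 1

-- ===== PRECONDITION & SPEC =====
def Spec_pari_core_py (n : Int) (out : Int) : Prop := out = pari_core_py_alt n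
instance (n : Int) (out : Int) : Decidable (Spec_pari_core_py n out) := by unfold Spec_pari_core_py; infer_instance

-- ===== CLAIM (what is proved, stated in full; the proofs are below) =====
def Claim_equal_pari_core_py : Prop := ∀ (n : Int), Dom_pari_core_py n → Spec_pari_core_py n (pari_core_py n)

-- ===== LEMMAS AND PROOFS =====
theorem pc_nat_unique (a b u v : Nat) (ha : a ≠ 0) (hb : b ≠ 0) (hu : u ≠ 0) (hv : v ≠ 0)
    (sfa : Squarefree a) (sfb : Squarefree b) (h : u*u*a = v*v*b) : a = b := by
  have hfa := (Nat.squarefree_iff_factorization_le_one ha).mp sfa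
  have hfb := (Nat.squarefree_iff_factorization_le_one hb).mp sfb
  apply Nat.factorization_inj (by simpa using ha) (by simpa using hb)
  ext p
  have e1 : (u*u*a).factorization p = u.factorization p + u.factorization p + a.factorization p := by
    rw [Nat.factorization_mul (by positivity) ha, Nat.factorization_mul hu hu]; simp
  have e2 : (v*v*b).factorization p = v.factorization p + v.factorization p + b.factorization p := by
    rw [Nat.factorization_mul (by positivity) hb, Nat.factorization_mul hv hv]; simp
  rw [h] at e1
  have := hfa p; have := hfb p
  omega

theorem pc_unique (m₁ m₂ s₁ s₂ : Int) (h₁ : 0 < m₁) (h₂ : 0 < m₂) (hs₁ : 0 < s₁) (hs₂ : 0 < s₂)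
    (sf₁ : ∀ e : Int, 2 ≤ e → ¬ e*e ∣ m₁) (sf₂ : ∀ e : Int, 2 ≤ e → ¬ e*e ∣ m₂)
    (heq : s₁*s₁*m₁ = s₂*s₂*m₂) : m₁ = m₂ := by
  have sqf : ∀ m : Int, 0 < m → (∀ e : Int, 2 ≤ e → ¬ e*e ∣ m) → Squarefree m.natAbs := by
    intro m hm sf
    rw [Nat.squarefree_iff_prime_squarefree]
    intro p hp hdvd
    refine sf (p : Int) (by exact_mod_cast hp.two_le) ?_
    have : ((p*p : Nat) : Int) ∣ (m.natAbs : Int) := Int.natCast_dvd_natCast.mpr hdvd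
    rw [Int.natAbs_of_nonneg (le_of_lt hm)] at this
    exact_mod_cast this
  have key : m₁.natAbs = m₂.natAbs := by
    have hnat : s₁.natAbs * s₁.natAbs * m₁.natAbs = s₂.natAbs * s₂.natAbs * m₂.natAbs := by
      have := congrArg Int.natAbs heq
      simpa [Int.natAbs_mul] using this
    exact pc_nat_unique _ _ _ _ (by omega) (by omega) (by omega) (by omega)
      (sqf m₁ h₁ sf₁) (sqf m₂ h₂ sf₂) hnat
  omega

theorem pc_exists_prime_dvd (e : Int) (he : 2 ≤ e) : ∃ p : Int, Prime p ∧ 2 ≤ p ∧ p ∣ e := by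
  refine ⟨(e.natAbs.minFac : Int), ?_, ?_, ?_⟩
  · rw [Int.prime_iff_natAbs_prime]
    simpa using Nat.minFac_prime (by omega)
  · exact_mod_cast (Nat.minFac_prime (show e.natAbs ≠ 1 by omega)).two_le
  · exact Int.dvd_natAbs.mp (Int.natCast_dvd_natCast.mpr (Nat.minFac_dvd e.natAbs))

theorem pc_sqfree_of_prime_sqfree (m : Int) (Psf : ∀ p : Int, Prime p → ¬ p*p ∣ m) :
    ∀ e : Int, 2 ≤ e → ¬ e*e ∣ m := by
  intro e he hdvd
  obtain ⟨p, hp, hp2, hpe⟩ := pc_exists_prime_dvd e he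
  exact Psf p hp (dvd_trans (mul_dvd_mul hpe hpe) hdvd)

theorem pc_prime_of_no_proper (q : Int) (hq : 2 ≤ q)
    (H : ∀ e : Int, 2 ≤ e → e < q → ¬ e ∣ q) : Prime q := by
  rw [Int.prime_iff_natAbs_prime]
  rw [Nat.prime_def_lt]
  refine ⟨by omega, ?_⟩
  intro m hm hdvd
  by_contra hne
  have h2 : 2 ≤ m := by
    rcases Nat.lt_or_ge m 2 with h | h
    · interval_cases m
      · simp at hdvd; omega
      · omega
    · exact h
  have : (m : Int) ∣ q := by
    have := Int.natCast_dvd_natCast.mpr hdvd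
    rwa [Int.natAbs_of_nonneg (by omega)] at this
  exact H m (by exact_mod_cast h2) (by omega) this

theorem pc_psf_mul_prime (r q : Int) (hq : Prime q) (hqr : ¬ q ∣ r)
    (Psf : ∀ p : Int, Prime p → ¬ p*p ∣ r) : ∀ p : Int, Prime p → ¬ p*p ∣ r * q := by
  intro p hp hdvd
  have hpq : p ∣ r * q := dvd_trans (dvd_mul_right p p) hdvd
  by_cases hpd : p ∣ q
  · have hassoc := Int.associated_iff.mp (hp.associated_of_dvd hq hpd)
    have hpp : p * p = q * q := by rcases hassoc with h | h <;> subst h <;> ring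
    rw [hpp] at hdvd
    obtain ⟨t, ht⟩ := hdvd
    have hq0 : q ≠ 0 := hq.ne_zero
    have : r = q * t := mul_right_cancel₀ hq0 (by rw [ht]; ring)
    exact hqr ⟨t, this⟩
  · have hpr : p ∣ r := (hp.dvd_mul.mp hpq).resolve_right hpd
    obtain ⟨w, hw⟩ := hpr
    obtain ⟨t, ht⟩ := hdvd
    have hp0 : p ≠ 0 := hp.ne_zero
    have : w * q = p * t := by
      have : p * (w * q) = p * (p * t) := by rw [← mul_assoc, ← hw]; linarith [ht]
      exact mul_left_cancel₀ hp0 this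
    have hpwq : p ∣ w * q := ⟨t, this⟩
    have hpw : p ∣ w := (hp.dvd_mul.mp hpwq).resolve_right hpd
    exact Psf p hp (by obtain ⟨u, hu⟩ := hpw; exact ⟨u, by rw [hw, hu]; ring⟩)


-- characterisation of A's loop: output is positive, squarefree, and res over a square
theorem pariA_loop_spec (k : Nat) (res : Int) : 0 < res →
    (∀ e : Int, 2 ≤ e → e < (k:Int)+2 → ¬ e*e ∣ res) →
    0 < pariA_loop k res ∧ (∃ s : Int, 0 < s ∧ s*s*pariA_loop k res = res) ∧
      (∀ e : Int, 2 ≤ e → ¬ e*e ∣ pariA_loop k res) := by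
  induction k, res using pariA_loop.induct with
  | case1 k res hle hm ih =>
    intro hres H
    have hdd : (0:Int) < ((k:Int)+2) * ((k:Int)+2) := by positivity
    have hdvd : ((k:Int)+2) * ((k:Int)+2) ∣ res :=
      (PySem.Int.mod_eq_zero_iff_dvd res (((k:Int)+2) * ((k:Int)+2))).mp hm
    have hfd : PySem.Int.floordiv res (((k:Int)+2) * ((k:Int)+2))
        = res / (((k:Int)+2) * ((k:Int)+2)) := PySem.Int.floordiv_eq_ediv_of_pos hdd
    have hexact : ((k:Int)+2) * ((k:Int)+2) * (res / (((k:Int)+2) * ((k:Int)+2))) = res :=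
      Int.mul_ediv_cancel' hdvd
    have hpos' : 0 < res / (((k:Int)+2) * ((k:Int)+2)) := by nlinarith [hexact]
    have hdvd2 : res / (((k:Int)+2) * ((k:Int)+2)) ∣ res := ⟨((k:Int)+2) * ((k:Int)+2), by rw [mul_comm]; exact hexact.symm⟩
    have H' : ∀ e : Int, 2 ≤ e → e < (k:Int)+2 → ¬ e*e ∣ res / (((k:Int)+2) * ((k:Int)+2)) := by
      intro e he hlt hdvd'
      exact H e he hlt (hdvd'.trans hdvd2)
    rw [pariA_loop, if_pos hle, if_pos hm, hfd]
    obtain ⟨ihpos, ⟨s, hs, hseq⟩, ihsf⟩ := ih (by rw [hfd]; exact hpos') (by rw [hfd]; exact H')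
    rw [hfd] at ihpos hseq ihsf
    refine ⟨ihpos, ⟨s * ((k:Int)+2), by positivity, ?_⟩, ihsf⟩
    have hr : (s * ((k:Int)+2)) * (s * ((k:Int)+2)) * pariA_loop k (res / (((k:Int)+2) * ((k:Int)+2)))
        = (s * s * pariA_loop k (res / (((k:Int)+2) * ((k:Int)+2)))) * (((k:Int)+2) * ((k:Int)+2)) := by ring
    rw [hr, hseq]
    linarith [hexact]
  | case2 k res hle hm ih =>
    intro hres H
    rw [pariA_loop, if_pos hle, if_neg hm]
    apply ih hres
    intro e he hlt hdvd
    by_cases heq : e = (k:Int)+2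
    · subst heq
      exact hm ((PySem.Int.mod_eq_zero_iff_dvd res _).mpr hdvd)
    · push_cast at hlt
      exact H e he (by omega) hdvd
  | case3 k res hle =>
    intro hres H
    rw [pariA_loop, if_neg hle]
    refine ⟨hres, ⟨1, one_pos, by ring⟩, ?_⟩
    intro e he hdvd
    by_cases hlt : e < (k:Int)+2
    · exact H e he hlt hdvd
    · have h1 : e*e ≤ res := Int.le_of_dvd hres hdvd
      push_neg at hlt
      nlinarith

-- characterisation of B's inner loop: it factors out d completely
theorem pariB_div_spec (d res : Int) (e : Nat) : 2 ≤ d → 0 < res →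
    ∃ j : Nat, (pariB_div d res e).2 = e + j ∧ d^j * (pariB_div d res e).1 = res ∧
      ¬ d ∣ (pariB_div d res e).1 := by
  induction res, e using pariB_div.induct d with
  | case1 res e h ih =>
    intro hd hres
    obtain ⟨-, -, hm⟩ := id h
    have hdvd : d ∣ res := (PySem.Int.mod_eq_zero_iff_dvd res d).mp hm
    have hfd : PySem.Int.floordiv res d = res / d := PySem.Int.floordiv_eq_ediv_of_pos (by omega)
    have hexact : d * (res / d) = res := Int.mul_ediv_cancel' hdvd
    have hpos' : 0 < res / d := by nlinarith [hexact]
    rw [pariB_div, dif_pos h]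
    obtain ⟨j, h1, h2, h3⟩ := ih hd (by rw [hfd]; exact hpos')
    refine ⟨j+1, by omega, ?_, h3⟩
    rw [hfd] at h2 ⊢
    have hp : d^(j+1) * (pariB_div d (res / d) (e+1)).1
        = d * (d^j * (pariB_div d (res / d) (e+1)).1) := by ring
    rw [hp, h2, hexact]
  | case2 res e h =>
    intro hd hres
    rw [pariB_div, dif_neg h]
    have hm : ¬ PySem.Int.mod res d = 0 := fun hm => h ⟨hd, hres, hm⟩
    exact ⟨0, by omega, by ring, fun hdvd => hm ((PySem.Int.mod_eq_zero_iff_dvd res d).mpr hdvd)⟩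

-- characterisation of B's outer loop
theorem pariB_loop_spec (k : Nat) (res result : Int) : 0 < res → 0 < result →
    (∀ e : Int, 2 ≤ e → e < (k:Int)+2 → ¬ e ∣ res) →
    (∀ p : Int, Prime p → p ∣ result → ¬ p ∣ res) →
    (∀ p : Int, Prime p → ¬ p*p ∣ result) →
    0 < pariB_loop k res result ∧
      (∃ s : Int, 0 < s ∧ s*s*pariB_loop k res result = result * res) ∧
      (∀ p : Int, Prime p → ¬ p*p ∣ pariB_loop k res result) := by
  induction k, res, result using pariB_loop.induct with
  | case1 k res result hle hm res' e heq ih =>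
    intro hres hresult H Hcop Psf
    have hd2 : (2:Int) ≤ (k:Int)+2 := by omega
    have hddvd : ((k:Int)+2) ∣ res := (PySem.Int.mod_eq_zero_iff_dvd res _).mp hm
    have hdprime : Prime ((k:Int)+2) := by
      apply pc_prime_of_no_proper _ hd2
      intro x hx hlt hdvd
      exact H x hx hlt (hdvd.trans hddvd)
    have hdnr : ¬ ((k:Int)+2) ∣ result := fun hdr => Hcop _ hdprime hdr hddvd
    obtain ⟨j, hj1, hj2, hj3⟩ := pariB_div_spec ((k:Int)+2) res 0 hd2 hres
    have hrpos : 0 < (pariB_div ((k:Int)+2) res 0).1 := (pariB_div_pos_le _ res 0 hres).1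
    rw [heq] at hj1 hj2 hj3 hrpos
    dsimp only at hj1 hj2 hj3 hrpos
    have hjpos : 1 ≤ j := by
      rcases Nat.eq_zero_or_pos j with h0 | h
      · exfalso; apply hj3; subst h0; rw [pow_zero, one_mul] at hj2; rw [hj2]; exact hddvd
      · exact h
    have hrdvd : res' ∣ res := by
      conv_rhs => rw [← hj2]
      exact dvd_mul_left _ _
    have H' : ∀ x : Int, 2 ≤ x → x < (k:Int)+2 → ¬ x ∣ res' :=
      fun x hx hlt hdvd => H x hx hlt (hdvd.trans hrdvd)
    rw [pariB_loop, if_pos hle, if_pos hm, heq]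
    dsimp only
    by_cases hpar : e % 2 = 1
    · rw [dif_pos hpar] at ih
      rw [if_pos hpar]
      have Hcop' : ∀ q : Int, Prime q → q ∣ result * ((k:Int)+2) → ¬ q ∣ res' := by
        intro q hq hqd hqr
        rcases hq.dvd_mul.mp hqd with hc | hc
        · exact Hcop q hq hc (hqr.trans hrdvd)
        · rcases Int.associated_iff.mp (hq.associated_of_dvd hdprime hc) with hx | hx
          · exact hj3 (hx ▸ hqr)
          · exact hj3 ((Int.neg_dvd).mp (hx ▸ hqr))
      obtain ⟨t, ht⟩ : ∃ t, j = 2*t+1 := ⟨j/2, by omega⟩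
      obtain ⟨ihpos, ⟨s, hs, hseq⟩, ihpsf⟩ :=
        ih hrpos (by positivity) H' Hcop' (pc_psf_mul_prime result _ hdprime hdnr Psf)
      refine ⟨ihpos, ⟨s * ((k:Int)+2)^t, by positivity, ?_⟩, ihpsf⟩
      have hr : (s * ((k:Int)+2)^t) * (s * ((k:Int)+2)^t) *
          pariB_loop k res' (result * ((k:Int)+2))
          = (s * s * pariB_loop k res' (result * ((k:Int)+2)))
            * (((k:Int)+2)^t * ((k:Int)+2)^t) := by ring
      rw [hr, hseq]
      conv_rhs => rw [← hj2]
      rw [ht]; ring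
    · rw [dif_neg hpar] at ih
      rw [if_neg hpar]
      have Hcop' : ∀ q : Int, Prime q → q ∣ result → ¬ q ∣ res' :=
        fun q hq hqd hqr => Hcop q hq hqd (hqr.trans hrdvd)
      obtain ⟨t, ht⟩ : ∃ t, j = 2*t := ⟨j/2, by omega⟩
      obtain ⟨ihpos, ⟨s, hs, hseq⟩, ihpsf⟩ := ih hrpos hresult H' Hcop' Psf
      refine ⟨ihpos, ⟨s * ((k:Int)+2)^t, by positivity, ?_⟩, ihpsf⟩
      have hr : (s * ((k:Int)+2)^t) * (s * ((k:Int)+2)^t) *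
          pariB_loop k res' result
          = (s * s * pariB_loop k res' result)
            * (((k:Int)+2)^t * ((k:Int)+2)^t) := by ring
      rw [hr, hseq]
      conv_rhs => rw [← hj2]
      rw [ht]; ring
  | case2 k res result hle hm ih =>
    intro hres hresult H Hcop Psf
    rw [pariB_loop, if_pos hle, if_neg hm]
    apply ih hres hresult _ Hcop Psf
    intro x hx hlt hdvd
    by_cases hxeq : x = (k:Int)+2
    · subst hxeq
      exact hm ((PySem.Int.mod_eq_zero_iff_dvd res _).mpr hdvd)
    · push_cast at hlt
      exact H x hx (by omega) hdvd
  | case3 k res result hle =>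
    intro hres hresult H Hcop Psf
    rw [pariB_loop, if_neg hle]
    refine ⟨mul_pos hresult hres, ⟨1, one_pos, by ring⟩, ?_⟩
    by_cases hres1 : res = 1
    · rw [hres1, mul_one]; exact Psf
    · have hres2 : (2:Int) ≤ res := by omega
      have hrprime : Prime res := by
        apply pc_prime_of_no_proper _ hres2
        intro x hx hlt hdvd
        by_cases hsm : x < (k:Int)+2
        · exact H x hx hsm hdvd
        · push_neg at hsm
          have hexact : x * (res / x) = res := Int.mul_ediv_cancel' hdvd
          have hfpos : 0 < res / x := by nlinarith [hexact]
          have hfne : res / x ≠ 1 := by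
            intro h1; rw [h1, mul_one] at hexact; omega
          have hflt : res / x < (k:Int)+2 := by nlinarith [hexact]
          have hfdvd : res / x ∣ res := by
            conv_rhs => rw [← hexact]
            exact dvd_mul_left _ _
          exact H (res / x) (by omega) hflt hfdvd
      have hnr : ¬ res ∣ result := fun h => Hcop res hrprime h (dvd_refl res)
      exact pc_psf_mul_prime result res hrprime hnr Psf

-- ===== VERDICT (by name: the statement is the Claim_ definition above) =====
theorem pari_core_py_spec : Claim_equal_pari_core_py := by
  intro n _
  unfold Spec_pari_core_py pari_core_py pari_core_py_alt
  by_cases hn : 0 < n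
  · obtain ⟨hApos, ⟨s₁, hs₁, hA⟩, hAsf⟩ :=
      pariA_loop_spec 0 n hn (by intro e he hlt; simp at hlt; omega)
    obtain ⟨hBpos, ⟨s₂, hs₂, hB⟩, hBpsf⟩ :=
      pariB_loop_spec 0 n 1 hn one_pos (by intro e he hlt; simp at hlt; omega)
        (by intro p hp hdvd; exact absurd hdvd hp.not_dvd_one)
        (by intro p hp hdvd; exact hp.not_dvd_one (dvd_trans (dvd_mul_right p p) hdvd))
    rw [one_mul] at hB
    exact pc_unique _ _ s₁ s₂ hApos hBpos hs₁ hs₂ hAsf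
      (pc_sqfree_of_prime_sqfree _ hBpsf) (by rw [hA, hB])
  · rw [pariA_loop, pariB_loop]
    rw [if_neg (by push_cast; omega), if_neg (by push_cast; omega), one_mul]
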